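-- pv_equiv track=rewrite | github.com/dantomige/neural-network | nn/utils.py | element_multiply_matrix
-- ===== SOURCE A (Python) =====
-- def transpose(matrix):
--     return [list(row) for row in zip(*matrix)]
--
-- def element_multiply_matrix(A: list[list[int]], B: list[list[int]]):
--     dims_A, dims_B = dims(A), dims(B)
--
--     assert dims_B[1] == 1
--     assert dims_A[1] == dims_B[0]
--
--     output = []
--     for col in zip(*A):
--         for row in B:
--             mag = row[0]
--             output.append(scale(mag, col))
--     return transpose(output)
--
-- def scale(mag, a):
--     return [mag * val for val in a]
--
-- def dims(A):
--     return (len(A), len(A[0]))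
-- ===== SOURCE B (Python) =====
-- def dims(A):
--     return (len(A), len(A[0]))
--
-- def element_multiply_matrix(A: list[list[int]], B: list[list[int]]):
--     dims_A, dims_B = dims(A), dims(B)
--
--     assert dims_B[1] == 1
--     assert dims_A[1] == dims_B[0]
--
--     n_cols = dims_A[1]
--     return [[B[b][0] * row[c] for c in range(n_cols) for b in range(len(B))]
--             for row in A]
-- ===== Notes on version B (the rewrite author's own statement) =====
-- stated objective: simpler
-- what changed: Instead of building a column-scaled intermediate matrix row-by-row via zip(*A) and then transposing it, B emits each result row directly with one comprehension over A's rows (c outer, b inner), removing the intermediate matrix and both transposition passes.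
-- outside the precondition, e.g. on element_multiply_matrix([[1, 2], [3]], [[5], [7]]): A returns [[5, 7], [15, 21]], B raises IndexError
import Mathlib
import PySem

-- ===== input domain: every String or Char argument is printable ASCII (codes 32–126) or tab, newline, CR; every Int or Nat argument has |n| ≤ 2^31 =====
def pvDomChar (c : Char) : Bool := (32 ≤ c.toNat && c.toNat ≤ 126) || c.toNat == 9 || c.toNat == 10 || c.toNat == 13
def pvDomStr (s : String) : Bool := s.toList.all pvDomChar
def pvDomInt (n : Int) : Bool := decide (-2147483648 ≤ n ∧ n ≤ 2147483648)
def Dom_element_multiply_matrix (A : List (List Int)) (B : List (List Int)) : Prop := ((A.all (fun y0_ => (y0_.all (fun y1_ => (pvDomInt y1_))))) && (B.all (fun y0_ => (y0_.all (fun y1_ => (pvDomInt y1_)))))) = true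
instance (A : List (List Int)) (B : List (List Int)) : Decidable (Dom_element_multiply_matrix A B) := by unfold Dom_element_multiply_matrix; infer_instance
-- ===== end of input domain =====

-- B replaces A's build-then-transpose (zip(*A), scaled columns appended, transpose) by emitting
-- each result row directly with one comprehension; return values proved equal on Pre_.

-- ===== PORT A =====
-- zip(*m) in Python: tuples of the heads while no list is exhausted (truncates to the shortest row).
def pyZipStar (m : List (List Int)) : List (List Int) :=
  if m.isEmpty then []
  else if m.any (·.isEmpty) then []
  else (m.map (·.headD 0)) :: pyZipStar (m.map (·.tail))
termination_by (m.headD []).length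
decreasing_by
  rename_i h1 h2
  simp only [List.isEmpty_iff] at h1
  cases m with
  | nil => exact absurd rfl h1
  | cons h t =>
    have hne : h ≠ [] := by
      intro he
      exact h2 (by simp [he])
    cases h with
    | nil => exact absurd rfl hne
    | cons a as => simp

def scaleA (mag : Int) (a : List Int) : List Int := a.map (fun v => mag * v)

def element_multiply_matrix (A : List (List Int)) (B : List (List Int)) : List (List Int) :=
  let output := (pyZipStar A).foldl
    (fun acc col => B.foldl (fun acc2 row => acc2 ++ [scaleA (row.headD 0) col]) acc) []
  pyZipStar output

-- ===== PORT B =====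
def element_multiply_matrix_alt (A : List (List Int)) (B : List (List Int)) : List (List Int) :=
  let nCols := (A.headD []).length
  A.map (fun row =>
    (List.range nCols).flatMap (fun c =>
      B.map (fun brow => brow.headD 0 * row.getD c 0)))

-- ===== PRECONDITION & SPEC =====
-- Pre_ excludes inputs where the Python A raises (empty A or B, an empty row of B, a failing
-- assert) and ragged A with a row shorter than A[0], where A's zip(*A) silently truncates the
-- columns while B's direct indexing raises IndexError.
def Pre_element_multiply_matrix (A : List (List Int)) (B : List (List Int)) : Prop :=
  A ≠ [] ∧ B ≠ [] ∧ (B.headD []).length = 1 ∧ (A.headD []).length = B.length ∧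
  (∀ row ∈ A, (A.headD []).length ≤ row.length) ∧ (∀ row ∈ B, row ≠ [])
instance (A : List (List Int)) (B : List (List Int)) : Decidable (Pre_element_multiply_matrix A B) := by
  unfold Pre_element_multiply_matrix; infer_instance

def pvWitness_element_multiply_matrix : List (List Int) × List (List Int) :=
  ([[1, 2], [3, 4]], [[5], [7]])

def Spec_element_multiply_matrix (A : List (List Int)) (B : List (List Int)) (out : List (List Int)) : Prop := out = element_multiply_matrix_alt A B
instance (A : List (List Int)) (B : List (List Int)) (out : List (List Int)) : Decidable (Spec_element_multiply_matrix A B out) := by unfold Spec_element_multiply_matrix; infer_instance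

-- ===== CLAIM (what is proved, stated in full; the proofs are below) =====
def Claim_equal_element_multiply_matrix : Prop := ∀ (A : List (List Int)) (B : List (List Int)), Dom_element_multiply_matrix A B → Pre_element_multiply_matrix A B → Spec_element_multiply_matrix A B (element_multiply_matrix A B)

-- ===== LEMMAS AND PROOFS =====

def colAt (M : List (List Int)) (c : Nat) : List Int := M.map (fun row => row.getD c 0)

theorem pvFoldlPush {a : Type} {b : Type} (l : List a) (g : a → b) (acc : List b) :
    l.foldl (fun a2 x => a2 ++ [g x]) acc = acc ++ l.map g := by
  induction l generalizing acc with
  | nil => simp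
  | cons h t ih => simp [ih]

theorem pvOutputEq (cols : List (List Int)) (B : List (List Int)) (acc : List (List Int)) :
    cols.foldl (fun acc2 col => B.foldl (fun a2 row => a2 ++ [scaleA (row.headD 0) col]) acc2) acc
      = acc ++ cols.flatMap (fun col => B.map (fun row => scaleA (row.headD 0) col)) := by
  induction cols generalizing acc with
  | nil => simp
  | cons c t ih =>
    rw [List.foldl_cons, pvFoldlPush, ih]
    simp [List.flatMap_cons]

theorem pvTailGetD (l : List Int) (hl : l ≠ []) (c : Nat) (d : Int) :
    l.tail.getD c d = l.getD (c + 1) d := by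
  cases l with
  | nil => exact absurd rfl hl
  | cons a as => rfl

theorem pvZipStarEq (n : Nat) : ∀ (M : List (List Int)), M ≠ [] →
    (∃ r ∈ M, r.length = n) → (∀ r ∈ M, n ≤ r.length) →
    pyZipStar M = (List.range n).map (colAt M) := by
  induction n with
  | zero =>
    intro M hM hex _
    obtain ⟨r, hrm, hr0⟩ := hex
    have hany : M.any (·.isEmpty) = true :=
      List.any_eq_true.mpr ⟨r, hrm, by simpa [List.isEmpty_iff, List.length_eq_zero_iff] using hr0⟩
    rw [pyZipStar]
    simp [List.isEmpty_iff, hM, hany]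
  | succ n ih =>
    intro M hM hex hall
    obtain ⟨r, hrm, hrn⟩ := hex
    have hne : ∀ x ∈ M, x ≠ [] := by
      intro x hx he
      have := hall x hx
      simp [he] at this
    have hany : M.any (·.isEmpty) = false := by
      simp only [List.any_eq_false]
      intro x hx
      simpa [List.isEmpty_iff] using hne x hx
    rw [pyZipStar]
    simp only [List.isEmpty_iff, hM, hany, Bool.false_eq_true, if_false]
    have htne : M.map (·.tail) ≠ [] := by simpa using hM
    have htex : ∃ t ∈ M.map (·.tail), t.length = n := by
      refine ⟨r.tail, List.mem_map_of_mem hrm, ?_⟩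
      simp [hrn]
    have htall : ∀ t ∈ M.map (·.tail), n ≤ t.length := by
      intro t ht
      obtain ⟨x, hx, rfl⟩ := List.mem_map.mp ht
      have := hall x hx
      simp only [List.length_tail]
      omega
    rw [ih _ htne htex htall]
    have hcol : ∀ c : Nat, colAt (M.map (·.tail)) c = colAt M (c + 1) := by
      intro c
      simp only [colAt, List.map_map]
      exact List.map_congr_left (fun x hx => pvTailGetD x (hne x hx) c 0)
    have hhead : M.map (·.headD 0) = colAt M 0 := by
      apply List.map_congr_left
      intro x hx
      cases x with
      | nil => exact absurd rfl (hne _ hx)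
      | cons a as => rfl
    rw [List.range_succ_eq_map, List.map_cons, List.map_map, hhead]
    congr 1
    exact List.map_congr_left (fun c _ => hcol c)

theorem pvScaleGet (mag : Int) (M : List (List Int)) (c r : Nat) (hr : r < M.length) :
    (scaleA mag (M.map (fun row => row.getD c 0))).getD r 0 = mag * ((M[r]'hr).getD c 0) := by
  simp [scaleA, List.map_map, List.getD_eq_getElem?_getD, hr]

-- ===== VERDICT (by name: the statement is the Claim_ definition above) =====
theorem element_multiply_matrix_spec : Claim_equal_element_multiply_matrix := by
  intro A B _ hpre
  obtain ⟨hA, hB, _, hAB, hArows, hBrows⟩ := hpre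
  unfold Spec_element_multiply_matrix element_multiply_matrix element_multiply_matrix_alt
  set n := (A.headD []).length with hn
  have hheadA : A.headD [] ∈ A := by
    cases A with
    | nil => exact absurd rfl hA
    | cons h t => exact List.mem_cons_self
  have hzA : pyZipStar A = (List.range n).map (colAt A) :=
    pvZipStarEq n A hA ⟨A.headD [], hheadA, rfl⟩ hArows
  rw [hzA, pvOutputEq]
  simp only [List.nil_append]
  set output := ((List.range n).map (colAt A)).flatMap
      (fun col => B.map (fun row => scaleA (row.headD 0) col)) with hout
  have hmemlen : ∀ x ∈ output, x.length = A.length := by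
    intro x hx
    rw [hout] at hx
    obtain ⟨col, hcol, hx2⟩ := List.mem_flatMap.mp hx
    obtain ⟨c, _, rfl⟩ := List.mem_map.mp hcol
    obtain ⟨row, _, rfl⟩ := List.mem_map.mp hx2
    simp [scaleA, colAt]
  have hnpos : 0 < n := by
    rw [hAB]
    exact List.length_pos_iff.mpr hB
  have houtne : output ≠ [] := by
    have h0 : colAt A 0 ∈ (List.range n).map (colAt A) :=
      List.mem_map_of_mem (List.mem_range.mpr hnpos)
    have hb0 : B.headD [] ∈ B := by
      cases B with
      | nil => exact absurd rfl hB
      | cons h t => exact List.mem_cons_self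
    exact List.ne_nil_of_mem (List.mem_flatMap.mpr
      ⟨colAt A 0, h0, List.mem_map_of_mem hb0⟩)
  have houtex : ∃ x ∈ output, x.length = A.length := by
    obtain ⟨x, hx⟩ := List.exists_mem_of_ne_nil output houtne
    exact ⟨x, hx, hmemlen x hx⟩
  have houtall : ∀ x ∈ output, A.length ≤ x.length := by
    intro x hx; rw [hmemlen x hx]
  have hzO : pyZipStar output = (List.range A.length).map (colAt output) :=
    pvZipStarEq A.length output houtne houtex houtall
  rw [hzO]
  apply List.ext_getElem
  · simp
  · intro r h1 h2
    have hr : r < A.length := by simpa using h1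
    simp only [List.getElem_map, List.getElem_range, hout, colAt,
      List.map_flatMap, List.flatMap_map, List.map_map]
    congr 1
    funext c
    congr 1
    funext brow
    simp only [Function.comp_apply]
    rw [pvScaleGet _ _ _ _ hr]
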